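-- pv_equiv track=rewrite | github.com/MOONSakura0614/crater | crater-agent/src/crater_agent/tools/k8s_policy.py | _read_only_pattern_matches
-- ===== SOURCE A (Python) =====
-- _READ_ONLY_KUBECTL_PATTERNS = {
--     ("api-resources",),
--     ("api-versions",),
--     ("auth", "can-i"),
--     ("cluster-info",),
--     ("config", "view"),
--     ("describe",),
--     ("explain",),
--     ("get",),
--     ("logs",),
--     ("rollout", "status"),
--     ("top",),
--     ("version",),
--     ("wait",),
-- }
--
-- def _read_only_pattern_matches(tokens: list[str]) -> bool:
--     if not tokens or tokens[0] != "kubectl":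
--         return False
--     non_flag = [token for token in tokens[1:] if not token.startswith("-")]
--     for pattern in _READ_ONLY_KUBECTL_PATTERNS:
--         if tuple(non_flag[: len(pattern)]) == pattern:
--             return True
--     return False
-- ===== SOURCE B (Python) =====
-- _READ_ONLY_BY_FIRST_TOKEN = {
--     "api-resources": (),
--     "api-versions": (),
--     "auth": ("can-i",),
--     "cluster-info": (),
--     "config": ("view",),
--     "describe": (),
--     "explain": (),
--     "get": (),
--     "logs": (),
--     "rollout": ("status",),
--     "top": (),
--     "version": (),
--     "wait": (),
-- }
--
-- def _read_only_pattern_matches(tokens: list[str]) -> bool: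
--     if not tokens or tokens[0] != "kubectl":
--         return False
--     non_flag = [token for token in tokens[1:] if not token.startswith("-")]
--     if not non_flag:
--         return False
--     rest = _READ_ONLY_BY_FIRST_TOKEN.get(non_flag[0])
--     if rest is None:
--         return False
--     return tuple(non_flag[1:1 + len(rest)]) == rest
-- ===== Notes on version B (the rewrite author's own statement) =====
-- stated objective: idiomatic
-- what changed: Replaced the loop over all 13 patterns (each doing a prefix comparison) by a single dict lookup keyed on the first non-flag token, comparing only the remaining required tokens.
import Mathlib
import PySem

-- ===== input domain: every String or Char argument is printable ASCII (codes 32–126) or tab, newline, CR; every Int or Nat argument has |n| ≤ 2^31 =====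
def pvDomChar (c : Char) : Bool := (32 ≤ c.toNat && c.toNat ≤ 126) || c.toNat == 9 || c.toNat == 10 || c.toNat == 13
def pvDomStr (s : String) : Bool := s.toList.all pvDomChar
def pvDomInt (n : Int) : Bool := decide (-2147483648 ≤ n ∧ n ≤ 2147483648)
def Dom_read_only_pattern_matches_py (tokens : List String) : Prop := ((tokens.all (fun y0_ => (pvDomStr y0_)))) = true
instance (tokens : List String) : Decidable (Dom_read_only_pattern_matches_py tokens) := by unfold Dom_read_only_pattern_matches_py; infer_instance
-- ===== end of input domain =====

-- B replaces A's scan over all 13 patterns with a single first-token dict lookup (idiomatic; same results).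

-- ===== PORT A =====
-- the module-level pattern set (iteration order of the Python set does not affect the Boolean result)
def pvPatterns : List (List String) :=
  [["api-resources"], ["api-versions"], ["auth", "can-i"], ["cluster-info"],
   ["config", "view"], ["describe"], ["explain"], ["get"], ["logs"],
   ["rollout", "status"], ["top"], ["version"], ["wait"]]

def read_only_pattern_matches_py (tokens : List String) : Bool :=
  match tokens with
  | [] => false
  | t0 :: rest =>
    if t0 ≠ "kubectl" then false
    else
      let non_flag := rest.filter (fun t => !(PySem.Str.startswith t "-"))
      pvPatterns.any (fun p => non_flag.take p.length == p)

-- ===== PORT B =====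
-- the dict keyed on the first token, mapping to the remaining required tokens
def pvByFirstToken : PySem.Dict String (List String) :=
  PySem.Dict.ofList [("api-resources", []), ("api-versions", []), ("auth", ["can-i"]), ("cluster-info", []),
   ("config", ["view"]), ("describe", []), ("explain", []), ("get", []), ("logs", []),
   ("rollout", ["status"]), ("top", []), ("version", []), ("wait", [])]

def read_only_pattern_matches_py_alt (tokens : List String) : Bool :=
  match tokens with
  | [] => false
  | t0 :: rest =>
    if t0 ≠ "kubectl" then false
    else
      match rest.filter (fun t => !(PySem.Str.startswith t "-")) with
      | [] => false
      | h :: tl =>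
        match PySem.Dict.get? pvByFirstToken h with
        | none => false
        | some req => tl.take req.length == req

-- ===== PRECONDITION & SPEC =====
def Spec_read_only_pattern_matches_py (tokens : List String) (out : Bool) : Prop := out = read_only_pattern_matches_py_alt tokens
instance (tokens : List String) (out : Bool) : Decidable (Spec_read_only_pattern_matches_py tokens out) := by unfold Spec_read_only_pattern_matches_py; infer_instance

-- ===== CLAIM (what is proved, stated in full; the proofs are below) =====
def Claim_equal_read_only_pattern_matches_py : Prop := ∀ (tokens : List String), Dom_read_only_pattern_matches_py tokens → Spec_read_only_pattern_matches_py tokens (read_only_pattern_matches_py tokens)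

-- ===== LEMMAS AND PROOFS =====

-- the dict built by ofList, as a literal item list
theorem pvByFirstToken_items : pvByFirstToken = PySem.Dict.mk
  [("api-resources", []), ("api-versions", []), ("auth", ["can-i"]), ("cluster-info", []),
   ("config", ["view"]), ("describe", []), ("explain", []), ("get", []), ("logs", []),
   ("rollout", ["status"]), ("top", []), ("version", []), ("wait", [])] := by decide

-- core: for a nonempty non-flag list, the pattern scan equals the first-token lookup
theorem pv_core (h : String) (tl : List String) :
    pvPatterns.any (fun p => (h :: tl).take p.length == p)
      = (match PySem.Dict.get? pvByFirstToken h with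
         | none => false
         | some req => tl.take req.length == req) := by
  by_cases h1 : h = "api-resources"
  · simp [pvPatterns, pvByFirstToken_items, PySem.Dict.get?, h1]
  by_cases h2 : h = "api-versions"
  · simp [pvPatterns, pvByFirstToken_items, PySem.Dict.get?, h2]
  by_cases h3 : h = "auth"
  · simp [pvPatterns, pvByFirstToken_items, PySem.Dict.get?, h3]
  by_cases h4 : h = "cluster-info"
  · simp [pvPatterns, pvByFirstToken_items, PySem.Dict.get?, h4]
  by_cases h5 : h = "config"
  · simp [pvPatterns, pvByFirstToken_items, PySem.Dict.get?, h5]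
  by_cases h6 : h = "describe"
  · simp [pvPatterns, pvByFirstToken_items, PySem.Dict.get?, h6]
  by_cases h7 : h = "explain"
  · simp [pvPatterns, pvByFirstToken_items, PySem.Dict.get?, h7]
  by_cases h8 : h = "get"
  · simp [pvPatterns, pvByFirstToken_items, PySem.Dict.get?, h8]
  by_cases h9 : h = "logs"
  · simp [pvPatterns, pvByFirstToken_items, PySem.Dict.get?, h9]
  by_cases h10 : h = "rollout"
  · simp [pvPatterns, pvByFirstToken_items, PySem.Dict.get?, h10]
  by_cases h11 : h = "top"
  · simp [pvPatterns, pvByFirstToken_items, PySem.Dict.get?, h11]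
  by_cases h12 : h = "version"
  · simp [pvPatterns, pvByFirstToken_items, PySem.Dict.get?, h12]
  by_cases h13 : h = "wait"
  · simp [pvPatterns, pvByFirstToken_items, PySem.Dict.get?, h13]
  · simp [pvPatterns, pvByFirstToken_items, PySem.Dict.get?, h1, h2, h3, h4, h5, h6, h7, h8, h9, h10, h11, h12, h13, Ne.symm h1, Ne.symm h2, Ne.symm h3, Ne.symm h4, Ne.symm h5, Ne.symm h6, Ne.symm h7, Ne.symm h8, Ne.symm h9, Ne.symm h10, Ne.symm h11, Ne.symm h12, Ne.symm h13]

-- ===== VERDICT (by name: the statement is the Claim_ definition above) =====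
theorem read_only_pattern_matches_py_spec : Claim_equal_read_only_pattern_matches_py := by
  intro tokens _
  unfold Spec_read_only_pattern_matches_py read_only_pattern_matches_py read_only_pattern_matches_py_alt
  match tokens with
  | [] => rfl
  | t0 :: rest =>
    by_cases hk : t0 = "kubectl"
    · simp only [hk, ne_eq, not_true_eq_false, if_false]
      cases hnf : rest.filter (fun t => !(PySem.Str.startswith t "-")) with
      | nil => simp [pvPatterns]
      | cons h tl => exact pv_core h tl
    · simp [hk]
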